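-- pv_equiv track=rewrite | github.com/simonwhitaker/quiz-scraper | quiz-scraper.py | get_summary_pages
-- ===== SOURCE A (Python) =====
-- def get_summary_pages(answers):
--     pages = []
--     page = ''
--     for i, a in enumerate(answers):
--         page += '- {}\n'.format(a)
--         if i % 5 == 4:
--             pages.append(page)
--             page = ''
--     return pages
-- ===== SOURCE B (Python) =====
-- def get_summary_pages(answers):
--     return [''.join('- {}\n'.format(a) for a in answers[5 * p:5 * p + 5])
--             for p in range(len(answers) // 5)]
-- ===== Notes on version B (the rewrite author's own statement) =====
-- stated objective: simpler
-- what changed: Replaces the modulo-counter accumulator loop with index-based chunking: a comprehension over range(len(answers)//5) that joins each 5-slice, which inherently drops the trailing partial group.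
import Mathlib
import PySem

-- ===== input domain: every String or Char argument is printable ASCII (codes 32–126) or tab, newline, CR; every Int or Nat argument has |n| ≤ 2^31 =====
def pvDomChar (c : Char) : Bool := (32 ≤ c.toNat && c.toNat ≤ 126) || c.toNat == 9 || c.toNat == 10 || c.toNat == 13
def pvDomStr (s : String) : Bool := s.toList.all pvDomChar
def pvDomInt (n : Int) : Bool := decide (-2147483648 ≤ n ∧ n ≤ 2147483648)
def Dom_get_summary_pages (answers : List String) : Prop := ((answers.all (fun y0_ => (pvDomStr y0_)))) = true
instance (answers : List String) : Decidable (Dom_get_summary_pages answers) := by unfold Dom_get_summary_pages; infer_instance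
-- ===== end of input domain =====

-- B groups answers by index-based 5-slices joined per chunk instead of A's modulo-counter accumulator; objective: simpler.

-- shared helper: the formatted line '- {}\n'.format(a)
def pvLine (a : String) : String := "- " ++ a ++ "\n"

-- ===== PORT A =====
def get_summary_pages (answers : List String) : List String :=
  ((PySem.List.enumerate answers 0).foldl
    (fun (st : List String × String) ia =>
      let page := st.2 ++ pvLine ia.2
      if PySem.Int.mod ia.1 5 == 4 then (st.1 ++ [page], "") else (st.1, page))
    ([], "")).1

-- ===== PORT B =====
def get_summary_pages_alt (answers : List String) : List String :=
  (PySem.List.pyRange 0 (PySem.Int.floordiv (answers.length : Int) 5) 1).map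
    (fun p => PySem.Str.join "" ((PySem.List.slice answers (some (5 * p)) (some (5 * p + 5))).map pvLine))

-- ===== PRECONDITION & SPEC =====
def Spec_get_summary_pages (answers : List String) (out : List String) : Prop := out = get_summary_pages_alt answers
instance (answers : List String) (out : List String) : Decidable (Spec_get_summary_pages answers out) := by unfold Spec_get_summary_pages; infer_instance

-- ===== CLAIM (what is proved, stated in full; the proofs are below) =====
def Claim_equal_get_summary_pages : Prop := ∀ (answers : List String), Dom_get_summary_pages answers → Spec_get_summary_pages answers (get_summary_pages answers)

-- ===== LEMMAS AND PROOFS =====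

-- both programs' pages, expressed as Nat-indexed 5-chunks
def pvChunks (l : List String) : List String :=
  (List.range (l.length / 5)).map
    (fun k => PySem.Str.join "" (((l.drop (5*k)).take 5).map pvLine))

-- A's loop body as a named function (definitionally equal to the lambda in the port)
def pvStep : (List String × String) → (Int × String) → (List String × String) :=
  fun st ia =>
    let page := st.2 ++ pvLine ia.2
    if PySem.Int.mod ia.1 5 == 4 then (st.1 ++ [page], "") else (st.1, page)

lemma alt_eq_chunks (l : List String) : get_summary_pages_alt l = pvChunks l := by
  unfold get_summary_pages_alt pvChunks
  rw [show PySem.Int.floordiv (l.length : Int) 5 = ((l.length / 5 : Nat) : Int) by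
        exact_mod_cast PySem.Int.floordiv_natCast l.length 5]
  rw [PySem.List.pyRange_one]
  simp only [List.map_map, Int.sub_zero, Int.toNat_natCast]
  apply List.map_congr_left
  intro k hk
  simp only [Function.comp, Int.zero_add]
  congr 1
  have h1 : (5 * (k:Int)) = ((5*k : Nat) : Int) := by push_cast; ring
  rw [h1, show (((5 * k : Nat) : Int) + 5) = (((5*k : Nat):Int) + ((5:Nat):Int)) by norm_num,
      PySem.List.slice_natCast_add]

lemma join5 (s0 s1 s2 s3 s4 : String) :
    PySem.Str.join "" [s0,s1,s2,s3,s4] = s0 ++ s1 ++ s2 ++ s3 ++ s4 := by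
  apply String.toList_injective
  simp [PySem.Str.toList_join, PySem.Chars.join, List.intercalate]

lemma mod5_emod (x : Int) : PySem.Int.mod x 5 = x % 5 :=
  PySem.Int.mod_eq_emod_of_pos (by norm_num)

lemma pvChunks_cons5 (a0 a1 a2 a3 a4 : String) (rest : List String) :
    pvChunks (a0::a1::a2::a3::a4::rest)
      = (pvLine a0 ++ pvLine a1 ++ pvLine a2 ++ pvLine a3 ++ pvLine a4) :: pvChunks rest := by
  unfold pvChunks
  have hlen : (a0::a1::a2::a3::a4::rest).length / 5 = rest.length / 5 + 1 := by
    simp [List.length_cons]; omega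
  rw [hlen, List.range_succ_eq_map]
  simp only [List.map_cons, List.map_map]
  congr 1
  norm_num [List.take, join5]

lemma A_general : ∀ (n : Nat) (l : List String), l.length = n → ∀ (q : Nat) (pages : List String),
    ((PySem.List.enumerate l (5*(q:Int))).foldl pvStep (pages, "")).1 = pages ++ pvChunks l := by
  intro n
  induction n using Nat.strong_induction_on with
  | _ n ih =>
    intro l hl q pages
    match l with
    | [] => simp [PySem.List.enumerate_nil, pvChunks]
    | [a0] =>
      simp only [PySem.List.enumerate_cons, PySem.List.enumerate_nil, List.foldl_cons,
        List.foldl_nil, pvStep, mod5_emod, beq_iff_eq]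
      split_ifs <;> first | omega | simp [pvChunks]
    | [a0, a1] =>
      simp only [PySem.List.enumerate_cons, PySem.List.enumerate_nil, List.foldl_cons,
        List.foldl_nil, pvStep, mod5_emod, beq_iff_eq]
      split_ifs <;> first | omega | simp [pvChunks]
    | [a0, a1, a2] =>
      simp only [PySem.List.enumerate_cons, PySem.List.enumerate_nil, List.foldl_cons,
        List.foldl_nil, pvStep, mod5_emod, beq_iff_eq]
      split_ifs <;> first | omega | simp [pvChunks]
    | [a0, a1, a2, a3] =>
      simp only [PySem.List.enumerate_cons, PySem.List.enumerate_nil, List.foldl_cons,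
        List.foldl_nil, pvStep, mod5_emod, beq_iff_eq]
      split_ifs <;> first | omega | simp [pvChunks]
    | a0 :: a1 :: a2 :: a3 :: a4 :: rest =>
      have hrest : rest.length < n := by subst hl; simp; omega
      simp only [PySem.List.enumerate_cons, List.foldl_cons, pvStep, mod5_emod, beq_iff_eq]
      split_ifs <;> try omega
      rw [show (5:Int)*(q:Int) + 1 + 1 + 1 + 1 + 1 = 5*((q+1 : Nat) : Int) by push_cast; ring]
      rw [ih rest.length hrest rest rfl (q+1)]
      rw [pvChunks_cons5]
      simp

-- ===== VERDICT (by name: the statement is the Claim_ definition above) =====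
theorem get_summary_pages_spec : Claim_equal_get_summary_pages := by
  intro answers _
  show get_summary_pages answers = get_summary_pages_alt answers
  rw [alt_eq_chunks]
  show ((PySem.List.enumerate answers 0).foldl pvStep ([], "")).1 = pvChunks answers
  have h := A_general answers.length answers rfl 0 []
  simpa using h
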